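-- pv_equiv track=rewrite | github.com/jimewu/ComfyUI-DepthCrafter-Nodes | depthcrafter/depth_crafter_ppl.py | _calculate_tiles
-- ===== SOURCE A (Python) =====
-- import math
--
-- def _calculate_tiles(
--
--     height: int,
--     width: int,
--     tile_size: int,
--     tile_overlap: int
-- ) -> tuple:
--     """計算空間分塊的座標"""
--     stride = tile_size - tile_overlap
--
--     n_tiles_y = max(1, math.ceil((height - tile_overlap) / stride))
--     n_tiles_x = max(1, math.ceil((width - tile_overlap) / stride))
--
--     tiles = []
--     for ty in range(n_tiles_y):
--         for tx in range(n_tiles_x):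
--             y_start = ty * stride
--             x_start = tx * stride
--             y_end = min(y_start + tile_size, height)
--             x_end = min(x_start + tile_size, width)
--
--             actual_h = y_end - y_start
--             actual_w = x_end - x_start
--
--             target_h = ((actual_h + 63) // 64) * 64
--             target_w = ((actual_w + 63) // 64) * 64
--
--             pad_bottom = target_h - actual_h
--             pad_right = target_w - actual_w
--
--             tiles.append({
--                 'y_start': y_start,
--                 'y_end': y_end,
--                 'x_start': x_start,
--                 'x_end': x_end,
--                 'pad_bottom': pad_bottom,
--                 'pad_right': pad_right,
--                 'target_h': target_h,
--                 'target_w': target_w,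
--                 'tile_y': ty,
--                 'tile_x': tx,
--             })
--
--     return tiles, n_tiles_y, n_tiles_x
-- ===== SOURCE B (Python) =====
-- import math
--
-- def _calculate_tiles(
--
--     height: int,
--     width: int,
--     tile_size: int,
--     tile_overlap: int
-- ) -> tuple:
--     """Staged decomposition: one linear pass per axis building coordinate records,
--     then a cartesian-product comprehension that only assembles the tile dicts."""
--     stride = tile_size - tile_overlap
--
--     def axis_records(limit):
--         n = max(1, math.ceil((limit - tile_overlap) / stride))
--         recs = []
--         for i in range(n):
--             start = i * stride
--             end = min(start + tile_size, limit)
--             actual = end - start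
--             target = ((actual + 63) // 64) * 64
--             recs.append((start, end, target - actual, target, i))
--         return n, recs
--
--     n_tiles_y, y_recs = axis_records(height)
--     n_tiles_x, x_recs = axis_records(width)
--
--     tiles = [
--         {
--             'y_start': ys,
--             'y_end': ye,
--             'x_start': xs,
--             'x_end': xe,
--             'pad_bottom': pb,
--             'pad_right': pr,
--             'target_h': th,
--             'target_w': tw,
--             'tile_y': ty,
--             'tile_x': tx,
--         }
--         for (ys, ye, pb, th, ty) in y_recs
--         for (xs, xe, pr, tw, tx) in x_recs
--     ]
--
--     return tiles, n_tiles_y, n_tiles_x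
-- ===== Notes on version B (the rewrite author's own statement) =====
-- stated objective: alternative
-- what changed: Replaces the nested loop that recomputes all geometry per tile by two staged linear passes building per-axis record lists (start/end/pad/target per row and per column, computed once), plus a final cartesian-product comprehension that only merges a y-record with an x-record into each tile dict.
import Mathlib
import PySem

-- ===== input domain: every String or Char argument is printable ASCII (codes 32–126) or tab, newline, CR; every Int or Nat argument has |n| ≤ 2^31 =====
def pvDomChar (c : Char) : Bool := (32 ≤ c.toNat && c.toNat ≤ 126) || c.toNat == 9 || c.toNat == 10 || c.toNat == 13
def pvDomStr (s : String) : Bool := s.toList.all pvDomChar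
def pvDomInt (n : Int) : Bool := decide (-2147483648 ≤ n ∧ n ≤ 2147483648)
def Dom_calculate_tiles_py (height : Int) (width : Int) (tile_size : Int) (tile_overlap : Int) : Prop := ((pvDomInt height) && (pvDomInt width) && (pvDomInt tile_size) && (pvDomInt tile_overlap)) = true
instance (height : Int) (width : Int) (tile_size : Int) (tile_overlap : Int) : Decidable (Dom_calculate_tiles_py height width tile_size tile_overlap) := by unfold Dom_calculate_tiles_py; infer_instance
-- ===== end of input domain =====

-- B replaces A's nested loop (which recomputes all geometry per tile) by two staged linear
-- passes building per-axis record lists, then a cartesian-product merge; same values, no speed claim.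
-- On the Dom_ integer range the float division math.ceil((limit-overlap)/stride) is exact,
-- so it is ported in both ports as the exact integer ceiling -((-(a)) // stride).

-- ===== PORT A =====
def calculate_tiles_py (height : Int) (width : Int) (tile_size : Int) (tile_overlap : Int) : (List (List (String × Int))) × Int × Int :=
  let stride := tile_size - tile_overlap
  let n_tiles_y := max 1 (-(PySem.Int.floordiv (-(height - tile_overlap)) stride))
  let n_tiles_x := max 1 (-(PySem.Int.floordiv (-(width - tile_overlap)) stride))
  let tiles := (PySem.List.pyRange 0 n_tiles_y 1).foldl (fun acc ty =>
    (PySem.List.pyRange 0 n_tiles_x 1).foldl (fun acc tx =>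
      let y_start := ty * stride
      let x_start := tx * stride
      let y_end := min (y_start + tile_size) height
      let x_end := min (x_start + tile_size) width
      let actual_h := y_end - y_start
      let actual_w := x_end - x_start
      let target_h := (PySem.Int.floordiv (actual_h + 63) 64) * 64
      let target_w := (PySem.Int.floordiv (actual_w + 63) 64) * 64
      let pad_bottom := target_h - actual_h
      let pad_right := target_w - actual_w
      acc ++ [[("y_start", y_start), ("y_end", y_end), ("x_start", x_start), ("x_end", x_end),
               ("pad_bottom", pad_bottom), ("pad_right", pad_right),
               ("target_h", target_h), ("target_w", target_w), ("tile_y", ty), ("tile_x", tx)]]) acc) []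
  (tiles, n_tiles_y, n_tiles_x)

-- ===== PORT B =====
-- Source B's axis_records: a linear pass over one axis producing (start, end, pad, target, index) records
def pvAxisRecords (stride : Int) (tile_size : Int) (tile_overlap : Int) (limit : Int) :
    Int × List (Int × Int × Int × Int × Int) :=
  let n := max 1 (-(PySem.Int.floordiv (-(limit - tile_overlap)) stride))
  let recs := (PySem.List.pyRange 0 n 1).foldl (fun acc i =>
    let start := i * stride
    let end_ := min (start + tile_size) limit
    let actual := end_ - start
    let target := (PySem.Int.floordiv (actual + 63) 64) * 64
    acc ++ [(start, end_, target - actual, target, i)]) []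
  (n, recs)

def calculate_tiles_py_alt (height : Int) (width : Int) (tile_size : Int) (tile_overlap : Int) : (List (List (String × Int))) × Int × Int :=
  let stride := tile_size - tile_overlap
  let yres := pvAxisRecords stride tile_size tile_overlap height
  let xres := pvAxisRecords stride tile_size tile_overlap width
  let tiles := yres.2.flatMap (fun yr => xres.2.map (fun xr =>
    [("y_start", yr.1), ("y_end", yr.2.1), ("x_start", xr.1), ("x_end", xr.2.1),
     ("pad_bottom", yr.2.2.1), ("pad_right", xr.2.2.1),
     ("target_h", yr.2.2.2.1), ("target_w", xr.2.2.2.1),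
     ("tile_y", yr.2.2.2.2), ("tile_x", xr.2.2.2.2)]))
  (tiles, yres.1, xres.1)

-- ===== PRECONDITION & SPEC =====
-- Pre_ excludes exactly stride = 0, where Python A raises ZeroDivisionError.
def Pre_calculate_tiles_py (height : Int) (width : Int) (tile_size : Int) (tile_overlap : Int) : Prop := tile_size ≠ tile_overlap
instance (height : Int) (width : Int) (tile_size : Int) (tile_overlap : Int) : Decidable (Pre_calculate_tiles_py height width tile_size tile_overlap) := by unfold Pre_calculate_tiles_py; infer_instance
def pvWitness_calculate_tiles_py : Int × Int × Int × Int := (100, 100, 64, 16)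

def Spec_calculate_tiles_py (height : Int) (width : Int) (tile_size : Int) (tile_overlap : Int) (out : (List (List (String × Int))) × Int × Int) : Prop := out = calculate_tiles_py_alt height width tile_size tile_overlap
instance (height : Int) (width : Int) (tile_size : Int) (tile_overlap : Int) (out : (List (List (String × Int))) × Int × Int) : Decidable (Spec_calculate_tiles_py height width tile_size tile_overlap out) := by unfold Spec_calculate_tiles_py; infer_instance

-- ===== CLAIM (what is proved, stated in full; the proofs are below) =====
def Claim_equal_calculate_tiles_py : Prop := ∀ (height : Int) (width : Int) (tile_size : Int) (tile_overlap : Int), Dom_calculate_tiles_py height width tile_size tile_overlap → Pre_calculate_tiles_py height width tile_size tile_overlap → Spec_calculate_tiles_py height width tile_size tile_overlap (calculate_tiles_py height width tile_size tile_overlap)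

-- ===== LEMMAS AND PROOFS =====

-- ===== VERDICT (by name: the statement is the Claim_ definition above) =====
theorem calculate_tiles_py_spec : Claim_equal_calculate_tiles_py := by
  intro height width tile_size tile_overlap _hDom _hPre
  show _ = _
  unfold calculate_tiles_py calculate_tiles_py_alt pvAxisRecords
  simp only [PySem.List.foldl_append_singleton_eq_map, PySem.List.foldl_append_eq_flatMap,
    List.nil_append, List.flatMap_map, List.map_map]
  rfl
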